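-- pv_equiv track=rewrite | github.com/NoMoreCookies/SystemyOperacyjne | Lista3/algorithms/lfu.py | lfu
-- ===== SOURCE A (Python) =====
-- from collections import deque
--
-- def lfu(ciag_odwolan, rozmiar_pamieci):
--     #ZM.POMOCNICZE
--     #---------------------------------------------
--     pamiec = deque()  # FIFO
--     bity_odwolania = {}  # słownik bitów odwołania
--     bledy = 0
--     #---------------------------------------------
--
--     for strona in ciag_odwolan:
--         # Sprawdzenie, czy strona jest już w pamięci
--         #---------------------------------------------
--         if strona in bity_odwolania:
--             bity_odwolania[strona] = 1  # strona była użyta, ustawiamy bit na 1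
--             continue  # jeśli strona jest w pamięci, nie ma błędu
--         #---------------------------------------------
--
--         # Błąd strony – dodaj nową stronę do pamięci
--         #---------------------------------------------
--         bledy += 1
--         if len(pamiec) < rozmiar_pamieci:
--             pamiec.append(strona)
--             bity_odwolania[strona] = 1
--         else:
--             # Musimy usunąć stronę z początku kolejki
--             while bity_odwolania[pamiec[0]] == 1:
--                 # Strona dostaje drugą szansę, przenosimy ją na koniec kolejki
--                 #---------------------------------------------
--                 bit = pamiec.popleft()
--                 bity_odwolania[bit] = 0
--                 pamiec.append(bit)
--                 #---------------------------------------------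
--
--             # Teraz usuwamy stronę z początku kolejki, ponieważ jej bit odwołania wynosi 0
--             strona_do_usuniecia = pamiec.popleft()
--             del bity_odwolania[strona_do_usuniecia]
--
--             # Dodajemy nową stronę
--             pamiec.append(strona)
--             bity_odwolania[strona] = 1
--
--     return bledy
-- ===== SOURCE B (Python) =====
-- def lfu(ciag_odwolan, rozmiar_pamieci):
--     # purely functional step: memory is an immutable list of (page, bit) pairs in
--     # queue order, rebuilt by slicing each step; eviction locates the first
--     # zero-bit index in one scan instead of rotating elements one by one.
--     def step(mem, strona):
--         # hit: set the page's bit to 1 in place of its pair; no fault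
--         for i, (p, _) in enumerate(mem):
--             if p == strona:
--                 return mem[:i] + [(p, 1)] + mem[i + 1:], 0
--         # fault while filling
--         if len(mem) < rozmiar_pamieci:
--             return mem + [(strona, 1)], 1
--         # fault when full: victim = first pair with bit 0; every pair scanned
--         # before it keeps its place behind the survivors with its bit cleared
--         k = next((i for i, (_, b) in enumerate(mem) if b == 0), None)
--         if k is None:
--             return [(p, 0) for p, _ in mem[1:]] + [(strona, 1)], 1
--         return mem[k + 1:] + [(p, 0) for p, _ in mem[:k]] + [(strona, 1)], 1
--
--     mem, bledy = [], 0
--     for strona in ciag_odwolan: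
--         mem, f = step(mem, strona)
--         bledy += f
--     return bledy
-- ===== Notes on version B (the rewrite author's own statement) =====
-- stated objective: alternative
-- what changed: Replaces the mutable rotating deque plus a 0/1 reference-bit dict with a purely functional single-pass step: memory is an immutable list of (page, bit) pairs rebuilt by slicing each step, and eviction locates the first zero-bit index in one scan and reassembles the queue from slices instead of rotating elements to the back one by one.
import Mathlib
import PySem

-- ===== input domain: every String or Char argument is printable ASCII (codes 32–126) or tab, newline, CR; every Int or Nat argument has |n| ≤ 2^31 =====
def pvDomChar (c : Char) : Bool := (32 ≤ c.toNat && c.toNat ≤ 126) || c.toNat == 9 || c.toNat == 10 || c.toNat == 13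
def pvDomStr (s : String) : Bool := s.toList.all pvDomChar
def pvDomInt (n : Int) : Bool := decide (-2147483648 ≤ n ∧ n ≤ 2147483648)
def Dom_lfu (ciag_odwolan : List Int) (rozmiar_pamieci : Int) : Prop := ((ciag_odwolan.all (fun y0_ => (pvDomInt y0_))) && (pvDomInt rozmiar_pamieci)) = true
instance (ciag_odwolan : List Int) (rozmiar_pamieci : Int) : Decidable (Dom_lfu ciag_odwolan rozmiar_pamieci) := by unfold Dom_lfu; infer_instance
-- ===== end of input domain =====

-- B replaces A's mutable rotating deque + reference-bit dict with a purely functional step: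
-- memory is an immutable list of (page, bit) pairs rebuilt by slicing; eviction finds the
-- first zero-bit index in one scan instead of rotating elements one by one. Same fault count.
-- Neither program mutates its arguments.

-- ===== PORT A =====
-- the 'while bity[pamiec[0]] == 1' loop: each pass moves the front page to the back with
-- its bit cleared, so after at most pamiec.length passes the front bit is 0 and the loop
-- exits with the state unchanged since then; fuel = pamiec.length therefore returns exactly
-- the Python loop's final state (the fuel-0 branch coincides with the loop's exit state).
-- 'bity.getD front 0': the key is always present when Python reaches this line (KeyError
-- is unreachable on states the program builds), the default only totalizes the lookup.
def lfuSecondChance (fuel : Nat) (pamiec : List Int) (bity : PySem.Dict Int Int) :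
    List Int × PySem.Dict Int Int :=
  match fuel, pamiec with
  | fuel+1, front :: rest =>
    if bity.getD front 0 == 1 then
      lfuSecondChance fuel (rest ++ [front]) (bity.insert front 0)
    else (front :: rest, bity)
  | _, pamiec => (pamiec, bity)

def lfuStep (rozmiar_pamieci : Int) (st : List Int × PySem.Dict Int Int × Int) (strona : Int) :
    List Int × PySem.Dict Int Int × Int :=
  let (pamiec, bity, bledy) := st
  if bity.contains strona then
    (pamiec, bity.insert strona 1, bledy)
  else
    let bledy := bledy + 1
    if (pamiec.length : Int) < rozmiar_pamieci then
      (pamiec ++ [strona], bity.insert strona 1, bledy)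
    else
      match lfuSecondChance pamiec.length pamiec bity with
      | (strona_do_usuniecia :: rest, bity2) =>
          (rest ++ [strona], (bity2.erase strona_do_usuniecia).insert strona 1, bledy)
      | ([], bity2) =>
          -- Python raises IndexError on pamiec[0] here (empty memory, rozmiar ≤ 0); excluded by Pre_
          ([strona], bity2.insert strona 1, bledy)

def lfu (ciag_odwolan : List Int) (rozmiar_pamieci : Int) : Int :=
  (ciag_odwolan.foldl (lfuStep rozmiar_pamieci) ([], PySem.Dict.empty, 0)).2.2

-- ===== PORT B =====
-- the hit scan 'for i, (p, _) in enumerate(mem): if p == strona: return mem[:i] + [(p,1)] + mem[i+1:]'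
def bHit : List (Int × Int) → Int → Option (List (Int × Int))
  | [], _ => none
  | (p, b) :: t, s => if p == s then some ((p, 1) :: t) else (bHit t s).map ((p, b) :: ·)

-- 'next((i for i, (_, b) in enumerate(mem) if b == 0), None)'
def bFindZero : List (Int × Int) → Option Nat
  | [] => none
  | (_, b) :: t => if b == 0 then some 0 else (bFindZero t).map (· + 1)

def bStep (rozmiar_pamieci : Int) (st : List (Int × Int) × Int) (strona : Int) :
    List (Int × Int) × Int :=
  let (mem, bledy) := st
  match bHit mem strona with
  | some mem' => (mem', bledy)
  | none =>
    if (mem.length : Int) < rozmiar_pamieci then (mem ++ [(strona, 1)], bledy + 1)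
    else
      match bFindZero mem with
      | none => ((mem.drop 1).map (fun pr => (pr.1, 0)) ++ [(strona, 1)], bledy + 1)
      | some k => (mem.drop (k + 1) ++ (mem.take k).map (fun pr => (pr.1, 0)) ++ [(strona, 1)], bledy + 1)

def lfu_alt (ciag_odwolan : List Int) (rozmiar_pamieci : Int) : Int :=
  (ciag_odwolan.foldl (bStep rozmiar_pamieci) ([], 0)).2

-- ===== PRECONDITION & SPEC =====
-- Pre_ excludes rozmiar_pamieci ≤ 0 with a nonempty reference string: there A raises
-- IndexError on pamiec[0] at the first fault.
def Pre_lfu (ciag_odwolan : List Int) (rozmiar_pamieci : Int) : Prop :=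
  1 ≤ rozmiar_pamieci ∨ ciag_odwolan = []
instance (ciag_odwolan : List Int) (rozmiar_pamieci : Int) : Decidable (Pre_lfu ciag_odwolan rozmiar_pamieci) := by unfold Pre_lfu; infer_instance
def pvWitness_lfu : List Int × Int := ([1, 2, 3, 4, 1, 2, 5, 1, 2, 3, 4, 5], 3)

def Spec_lfu (ciag_odwolan : List Int) (rozmiar_pamieci : Int) (out : Int) : Prop := out = lfu_alt ciag_odwolan rozmiar_pamieci
instance (ciag_odwolan : List Int) (rozmiar_pamieci : Int) (out : Int) : Decidable (Spec_lfu ciag_odwolan rozmiar_pamieci out) := by unfold Spec_lfu; infer_instance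

-- ===== CLAIM (what is proved, stated in full; the proofs are below) =====
def Claim_equal_lfu : Prop := ∀ (ciag_odwolan : List Int) (rozmiar_pamieci : Int), Dom_lfu ciag_odwolan rozmiar_pamieci → Pre_lfu ciag_odwolan rozmiar_pamieci → Spec_lfu ciag_odwolan rozmiar_pamieci (lfu ciag_odwolan rozmiar_pamieci)

-- ===== LEMMAS AND PROOFS =====

-- first-match lookup in B's pair list; mirrors A's dict lookups
def lookB : List (Int × Int) → Int → Option Int
  | [], _ => none
  | (q, b) :: t, p => if q = p then some b else lookB t p

def clr : Int × Int → Int × Int := fun pr => (pr.1, 0)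

-- the queue-with-bits state A's while loop exits with, as a pair list: rem is the part of
-- the queue not yet scanned, acc the already-cleared part moved behind it
def scanRes (rem acc : List (Int × Int)) : List (Int × Int) :=
  match bFindZero rem with
  | some k => rem.drop k ++ acc ++ (rem.take k).map clr
  | none => acc ++ rem.map clr

-- coupling invariant: A's queue is B's pages, A's bit dict is B's first-match bit lookup
def RelAB (pamiec : List Int) (bity : PySem.Dict Int Int) (mem : List (Int × Int)) : Prop :=
  pamiec = mem.map Prod.fst ∧ (mem.map Prod.fst).Nodup ∧
  (∀ pr ∈ mem, pr.2 = 0 ∨ pr.2 = 1) ∧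
  (∀ p, bity.get? p = lookB mem p)

theorem dict_get?_erase (d : PySem.Dict Int Int) (k x : Int) :
    (d.erase k).get? x = if x = k then none else d.get? x := by
  obtain ⟨items⟩ := d
  simp only [PySem.Dict.erase, PySem.Dict.get?]
  by_cases hxk : x = k
  · subst hxk
    rw [if_pos rfl]
    have : List.find? (fun p => p.1 == x) (items.filter (fun p => !p.1 == x)) = none := by
      rw [List.find?_eq_none]
      intro p hp
      simp only [List.mem_filter, Bool.not_eq_eq_eq_not, Bool.not_true, beq_eq_false_iff_ne] at hp
      simp [hp.2]
    simp [this]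
  · rw [if_neg hxk, List.find?_filter]
    have : (fun (a : Int × Int) => decide ((!a.1 == k) = true ∧ (a.1 == x) = true))
         = (fun (p : Int × Int) => p.1 == x) := by
      funext a
      by_cases ha : a.1 = x
      · have hk : a.1 ≠ k := by rw [ha]; exact hxk
        simp [ha]; exact hxk
      · simp [ha]
    rw [this]

lemma lookB_append (l1 l2 : List (Int × Int)) (p : Int) :
    lookB (l1 ++ l2) p = (lookB l1 p).or (lookB l2 p) := by
  induction l1 with
  | nil => simp [lookB]
  | cons h t ih =>
    obtain ⟨q, b⟩ := h
    by_cases hq : q = p <;> simp [lookB, hq, ih]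

lemma lookB_eq_none_iff (l : List (Int × Int)) (p : Int) :
    lookB l p = none ↔ p ∉ l.map Prod.fst := by
  induction l with
  | nil => simp [lookB]
  | cons h t ih =>
    obtain ⟨q, b⟩ := h
    by_cases hq : q = p
    · simp [lookB, hq]
    · simp [lookB, hq, ih]
      exact fun _ h => hq h.symm

lemma bHit_none_iff (mem : List (Int × Int)) (s : Int) :
    bHit mem s = none ↔ s ∉ mem.map Prod.fst := by
  induction mem with
  | nil => simp [bHit]
  | cons h t ih =>
    obtain ⟨q, b⟩ := h
    by_cases hq : q = s
    · simp [bHit, hq]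
    · simp [bHit, hq, ih]
      exact fun _ h => hq h.symm

lemma bHit_some_spec (mem : List (Int × Int)) (s : Int) (mem' : List (Int × Int))
    (h : bHit mem s = some mem') :
    mem'.map Prod.fst = mem.map Prod.fst ∧
    (∀ p, lookB mem' p = if p = s then some 1 else lookB mem p) ∧
    (∀ pr ∈ mem', pr.2 = 0 ∨ pr.2 = 1 ∨ pr ∈ mem) := by
  induction mem generalizing mem' with
  | nil => simp [bHit] at h
  | cons hd t ih =>
    obtain ⟨q, b⟩ := hd
    by_cases hq : q = s
    · subst hq
      simp only [bHit, beq_self_eq_true, if_true, Option.some.injEq] at h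
      subst h
      refine ⟨rfl, ?_, ?_⟩
      · intro p
        by_cases hp : p = q
        · subst hp; simp [lookB]
        · have hqp : ¬ q = p := fun h => hp h.symm
          simp [lookB, hqp, hp]
      · intro pr hpr
        rcases List.mem_cons.1 hpr with h | h
        · subst h; right; left; rfl
        · right; right; exact List.mem_cons_of_mem _ h
    · simp only [bHit, beq_iff_eq, if_neg hq] at h
      obtain ⟨t', ht', hm⟩ := Option.map_eq_some_iff.1 h
      obtain ⟨hfst, hlk, hbit⟩ := ih t' ht'
      subst hm
      refine ⟨by simp [hfst], ?_, ?_⟩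
      · intro p
        by_cases hp : q = p
        · subst hp
          have hqs : ¬ (q = s) := hq
          simp [lookB, hqs]
        · simp [lookB, hp, hlk p]
      · intro pr hpr
        rcases List.mem_cons.1 hpr with h | h
        · subst h; right; right; exact List.mem_cons_self
        · rcases hbit pr h with h0 | h1 | hm
          · exact Or.inl h0
          · exact Or.inr (Or.inl h1)
          · exact Or.inr (Or.inr (List.mem_cons_of_mem _ hm))

lemma bFindZero_some_lt (l : List (Int × Int)) (k : Nat) (h : bFindZero l = some k) :
    k < l.length := by
  induction l generalizing k with
  | nil => simp [bFindZero] at h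
  | cons hd t ih =>
    obtain ⟨p, b⟩ := hd
    by_cases hb : b = 0
    · simp [bFindZero, hb] at h
      simp only [List.length_cons]
      omega
    · simp only [bFindZero, beq_iff_eq, if_neg hb] at h
      obtain ⟨k', hk', he⟩ := Option.map_eq_some_iff.1 h
      have := ih k' hk'
      simp [← he]; omega

lemma scanRes_shift (q : Int) (t acc : List (Int × Int)) :
    scanRes ((q, 1) :: t) acc = scanRes t (acc ++ [(q, 0)]) := by
  unfold scanRes
  cases h : bFindZero t with
  | none =>
    have hz : bFindZero ((q, 1) :: t) = none := by simp [bFindZero, h]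
    rw [hz]
    simp [clr]
  | some k =>
    have hz : bFindZero ((q, 1) :: t) = some (k + 1) := by simp [bFindZero, h]
    rw [hz]
    simp [clr]

-- the rotation loop of A computes exactly scanRes: induction moving the cleared front
-- behind the queue
lemma scan_corr (rem : List (Int × Int)) : ∀ (acc : List (Int × Int)) (bity : PySem.Dict Int Int),
    (∀ pr ∈ rem, pr.2 = 0 ∨ pr.2 = 1) →
    (∀ pr ∈ acc, pr.2 = 0) →
    ((rem ++ acc).map Prod.fst).Nodup →
    (∀ p, bity.get? p = lookB (rem ++ acc) p) →
    ∃ bity2, lfuSecondChance rem.length ((rem ++ acc).map Prod.fst) bity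
        = ((scanRes rem acc).map Prod.fst, bity2)
      ∧ (∀ p, bity2.get? p = lookB (scanRes rem acc) p) := by
  induction rem with
  | nil =>
    intro acc bity hb ha hnd hc
    refine ⟨bity, by simp [lfuSecondChance, scanRes, bFindZero], ?_⟩
    intro p
    rw [hc p]
    simp [scanRes, bFindZero]
  | cons hd t ih =>
    obtain ⟨q, b⟩ := hd
    intro acc bity hb ha hnd hc
    have hget : bity.getD q 0 = b := by
      rw [PySem.Dict.getD_eq_get?_getD, hc q]
      simp [lookB]
    rcases hb (q, b) List.mem_cons_self with h0 | h1
    · -- front bit 0: the loop exits at once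
      simp only at h0
      subst h0
      have hcond : (bity.getD q 0 == 1) = false := by rw [hget]; rfl
      have hsc : scanRes ((q, 0) :: t) acc = ((q, 0) :: t) ++ acc := by
        simp [scanRes, bFindZero]
      refine ⟨bity, ?_, ?_⟩
      · simp only [List.cons_append, List.map_cons, List.length_cons, lfuSecondChance, hcond,
          Bool.false_eq_true, if_false, hsc]
      · intro p
        rw [hc p, hsc]
    · -- front bit 1: cleared and moved to the back, recurse
      simp only at h1
      subst h1
      have hcond : (bity.getD q 0 == 1) = true := by rw [hget]; rfl
      have hq_not : q ∉ (t ++ acc).map Prod.fst := by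
        simp only [List.cons_append, List.map_cons, List.nodup_cons] at hnd
        exact hnd.1
      have hb' : ∀ pr ∈ t, pr.2 = 0 ∨ pr.2 = 1 := fun pr hpr => hb pr (List.mem_cons_of_mem _ hpr)
      have ha' : ∀ pr ∈ acc ++ [(q, 0)], pr.2 = 0 := by
        intro pr hpr
        rcases List.mem_append.1 hpr with hm | hm
        · exact ha pr hm
        · rw [List.mem_singleton.1 hm]
      have hnd' : ((t ++ (acc ++ [(q, 0)])).map Prod.fst).Nodup := by
        have he : (t ++ (acc ++ [(q, 0)])).map Prod.fst = ((t ++ acc).map Prod.fst) ++ [q] := by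
          simp
        rw [he]
        have hnd2 := hnd
        simp only [List.cons_append, List.map_cons, List.nodup_cons] at hnd2
        have hperm := List.perm_append_singleton q ((t ++ acc).map Prod.fst)
        rw [hperm.nodup_iff]
        exact List.nodup_cons.2 ⟨hnd2.1, hnd2.2⟩
      have hc' : ∀ p, (bity.insert q 0).get? p = lookB (t ++ (acc ++ [(q, 0)])) p := by
        intro p
        rw [PySem.Dict.get?_insert]
        have hra : (t ++ (acc ++ [(q, 0)])) = ((t ++ acc) ++ [(q, 0)]) := by
          rw [List.append_assoc]
        rw [hra, lookB_append]
        by_cases hp : p = q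
        · subst hp
          have hn : lookB (t ++ acc) p = none := by
            rw [lookB_eq_none_iff]; exact hq_not
          simp [hn, lookB]
        · have hqp : ¬ q = p := fun h => hp h.symm
          rw [if_neg hp, hc p]
          have h2 : lookB [(q, 0)] p = none := by simp [lookB, hqp]
          rw [h2, Option.or_none]
          simp [lookB, hqp]
      obtain ⟨bity2, hrun, hc2⟩ := ih (acc ++ [(q, 0)]) (bity.insert q 0) hb' ha' hnd' hc'
      have hshift : scanRes ((q, 1) :: t) acc = scanRes t (acc ++ [(q, 0)]) :=
        scanRes_shift q t acc
      refine ⟨bity2, ?_, ?_⟩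
      · have hlist2 : ((t ++ acc).map Prod.fst) ++ [q] = (t ++ (acc ++ [(q, 0)])).map Prod.fst := by
          simp
        simp only [List.cons_append, List.map_cons, List.length_cons, lfuSecondChance, hcond,
          if_true]
        rw [hlist2, hrun, hshift]
      · intro p
        rw [hc2 p, hshift]

lemma scanRes_perm (rem acc : List (Int × Int)) :
    ((scanRes rem acc).map Prod.fst).Perm ((rem ++ acc).map Prod.fst) := by
  have hclr : ∀ l : List (Int × Int), (l.map clr).map Prod.fst = l.map Prod.fst := by
    intro l; rw [List.map_map]; rfl
  unfold scanRes
  cases h : bFindZero rem with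
  | none =>
    simp only [List.map_append, hclr]
    exact List.perm_append_comm
  | some k =>
    simp only [List.map_append, hclr, List.map_drop, List.map_take]
    have h1 : ((rem.map Prod.fst).drop k ++ acc.map Prod.fst ++ (rem.map Prod.fst).take k).Perm
        ((rem.map Prod.fst).take k ++ ((rem.map Prod.fst).drop k ++ acc.map Prod.fst)) :=
      List.perm_append_comm
    have h2 : (rem.map Prod.fst).take k ++ ((rem.map Prod.fst).drop k ++ acc.map Prod.fst)
        = rem.map Prod.fst ++ acc.map Prod.fst := by
      rw [← List.append_assoc, List.take_append_drop]
    exact h1.trans (h2 ▸ List.Perm.refl _)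

lemma scanRes_bits (rem acc : List (Int × Int))
    (hbits : ∀ pr ∈ rem, pr.2 = 0 ∨ pr.2 = 1) (hacc : ∀ pr ∈ acc, pr.2 = 0) :
    ∀ pr ∈ scanRes rem acc, pr.2 = 0 ∨ pr.2 = 1 := by
  intro pr hpr
  unfold scanRes at hpr
  cases h : bFindZero rem with
  | none =>
    rw [h] at hpr
    rcases List.mem_append.1 hpr with hm | hm
    · exact Or.inl (hacc pr hm)
    · obtain ⟨x, _, hx⟩ := List.mem_map.1 hm
      subst hx; exact Or.inl rfl
  | some k =>
    rw [h] at hpr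
    rcases List.mem_append.1 hpr with hm | hm
    · rcases List.mem_append.1 hm with h3 | h3
      · exact hbits pr (List.mem_of_mem_drop h3)
      · exact Or.inl (hacc pr h3)
    · obtain ⟨x, _, hx⟩ := List.mem_map.1 hm
      subst hx; exact Or.inl rfl

lemma evict_dict_corr (bity2 : PySem.Dict Int Int) (v : Int × Int) (T : List (Int × Int)) (s : Int)
    (hc : ∀ p, bity2.get? p = lookB (v :: T) p)
    (hnd : ((v :: T).map Prod.fst).Nodup)
    (hs : s ∉ (v :: T).map Prod.fst) :
    ∀ p, ((bity2.erase v.1).insert s 1).get? p = lookB (T ++ [(s, 1)]) p := by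
  obtain ⟨v1, vb⟩ := v
  simp only [List.map_cons, List.nodup_cons, List.mem_map] at hnd
  simp only [List.map_cons, List.mem_cons, List.mem_map] at hs
  push Not at hs
  intro p
  rw [PySem.Dict.get?_insert, lookB_append]
  by_cases hp : p = s
  · subst hp
    have hT : lookB T p = none := by
      rw [lookB_eq_none_iff]
      intro hc
      obtain ⟨x, hx, hxe⟩ := List.mem_map.1 hc
      exact hs.2 x hx hxe
    simp [hT, lookB]
  · rw [if_neg hp, dict_get?_erase]
    have hsp : ¬ s = p := fun h => hp h.symm
    have h2 : lookB [(s, 1)] p = none := by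
      simp [lookB, hsp]
    rw [h2, Option.or_none]
    by_cases hv : p = v1
    · rw [if_pos hv]
      symm; rw [lookB_eq_none_iff]
      intro hc
      obtain ⟨x, hx, hxe⟩ := List.mem_map.1 hc
      exact hnd.1 ⟨x, hx, by rw [hxe, hv]⟩
    · rw [if_neg hv, hc p]
      have hvp : ¬ v1 = p := fun h => hv h.symm
      simp [lookB, hvp]

lemma step_rel (roz s : Int) (pamiec : List Int) (bity : PySem.Dict Int Int) (bledy : Int)
    (mem : List (Int × Int)) (hroz : 1 ≤ roz) (hrel : RelAB pamiec bity mem) :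
    ∃ pam' bity' mem' bl',
      lfuStep roz (pamiec, bity, bledy) s = (pam', bity', bl') ∧
      bStep roz (mem, bledy) s = (mem', bl') ∧
      RelAB pam' bity' mem' := by
  obtain ⟨hpam, hnd, hbits, hc⟩ := hrel
  subst hpam
  by_cases hmem : s ∈ mem.map Prod.fst
  · -- hit: A marks the bit, B rebuilds the pair in place; no fault
    have hcont : bity.contains s = true := by
      rw [PySem.Dict.contains_eq_isSome_get?, hc s]
      cases hl : lookB mem s with
      | none => exact absurd ((lookB_eq_none_iff mem s).1 hl) (by simpa using hmem)
      | some v => rfl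
    cases hh : bHit mem s with
    | none => exact absurd ((bHit_none_iff mem s).1 hh) (by simpa using hmem)
    | some mem' =>
      obtain ⟨hfst, hlk, hbit⟩ := bHit_some_spec mem s mem' hh
      refine ⟨mem.map Prod.fst, bity.insert s 1, mem', bledy,
        by simp only [lfuStep, hcont, if_true],
        by simp only [bStep, hh], ?_, ?_, ?_, ?_⟩
      · rw [hfst]
      · rw [hfst]; exact hnd
      · intro pr hpr
        rcases hbit pr hpr with h | h | h
        · exact Or.inl h
        · exact Or.inr h
        · exact hbits pr h
      · intro p
        rw [PySem.Dict.get?_insert, hlk p, hc p]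
  · -- miss
    have hlkB : lookB mem s = none := (lookB_eq_none_iff mem s).2 (by simpa using hmem)
    have hcont : bity.contains s = false := by
      rw [PySem.Dict.contains_eq_isSome_get?, hc s, hlkB]; rfl
    have hh : bHit mem s = none := (bHit_none_iff mem s).2 (by simpa using hmem)
    by_cases hlt : (((mem.map Prod.fst).length : Int) < roz)
    · -- fault while filling
      have hltB : ((mem.length : Int) < roz) := by rwa [List.length_map] at hlt
      refine ⟨mem.map Prod.fst ++ [s], bity.insert s 1, mem ++ [(s, 1)], bledy + 1,
        by simp only [lfuStep, hcont, Bool.false_eq_true, if_false, if_pos hlt],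
        by simp only [bStep, hh]; rw [if_pos hltB], ?_, ?_, ?_, ?_⟩
      · simp
      · simp only [List.map_append, List.map_cons, List.map_nil]
        have hperm := List.perm_append_singleton s (mem.map Prod.fst)
        rw [hperm.nodup_iff]
        exact List.nodup_cons.2 ⟨by simpa using hmem, hnd⟩
      · intro pr hpr
        rcases List.mem_append.1 hpr with hm | hm
        · exact hbits pr hm
        · rw [List.mem_singleton.1 hm]; exact Or.inr rfl
      · intro p
        rw [PySem.Dict.get?_insert, lookB_append]
        by_cases hp : p = s
        · subst hp
          simp [hlkB, lookB]
        · have hsp : ¬ s = p := fun h => hp h.symm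
          have h2 : lookB [(s, 1)] p = none := by simp [lookB, hsp]
          rw [if_neg hp, h2, Option.or_none, hc p]
    · -- fault when full: eviction
      have hltB : ¬ ((mem.length : Int) < roz) := by rwa [List.length_map] at hlt
      have hne : mem ≠ [] := by
        intro h
        rw [h] at hltB
        simp at hltB
        omega
      obtain ⟨bity2, hrun, hc2⟩ :=
        scan_corr mem [] bity hbits (by simp) (by simpa using hnd) (by intro p; rw [hc p]; simp)
      simp only [List.append_nil] at hrun
      obtain ⟨v, T, hvT⟩ : ∃ v T, scanRes mem [] = v :: T := by
        cases hsr : scanRes mem [] with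
        | nil =>
          exfalso
          have hp := scanRes_perm mem []
          rw [hsr] at hp
          have := hp.length_eq
          simp at this
          exact hne (List.length_eq_zero_iff.1 this.symm)
        | cons v T => exact ⟨v, T, rfl⟩
      have hndS : ((v :: T).map Prod.fst).Nodup := by
        rw [← hvT]
        exact ((scanRes_perm mem []).nodup_iff).2 (by simpa using hnd)
      have hsS : s ∉ (v :: T).map Prod.fst := by
        rw [← hvT]
        intro hcon
        exact hmem (by simpa using ((scanRes_perm mem []).mem_iff).1 hcon)
      have hbitsS : ∀ pr ∈ v :: T, pr.2 = 0 ∨ pr.2 = 1 := by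
        rw [← hvT]
        exact scanRes_bits mem [] hbits (by simp)
      have hArun : lfuStep roz (mem.map Prod.fst, bity, bledy) s
          = (T.map Prod.fst ++ [s], (bity2.erase v.1).insert s 1, bledy + 1) := by
        simp only [lfuStep, hcont, Bool.false_eq_true, if_false, if_neg hlt]
        rw [List.length_map, hrun, hvT]
        simp only [List.map_cons]
      have hBrun : bStep roz (mem, bledy) s = (T ++ [(s, 1)], bledy + 1) := by
        simp only [bStep, hh]
        rw [if_neg hltB]
        cases hfz : bFindZero mem with
        | none =>
          have hx : scanRes mem [] = mem.map clr := by simp [scanRes, hfz]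
          rw [hx] at hvT
          cases mem with
          | nil => exact absurd rfl hne
          | cons m0 mt =>
            simp only [List.map_cons] at hvT
            injection hvT with hv hT
            simp only [List.drop_succ_cons, List.drop_zero]
            rw [← hT]
            rfl
        | some k =>
          have hk := bFindZero_some_lt mem k hfz
          have hx : scanRes mem [] = mem[k] :: (mem.drop (k + 1) ++ (mem.take k).map clr) := by
            simp only [scanRes, hfz, List.append_nil]
            rw [List.drop_eq_getElem_cons hk]
            rfl
          rw [hx] at hvT
          injection hvT with hv hT
          simp only [← hT, List.append_assoc]; rfl
      refine ⟨T.map Prod.fst ++ [s], (bity2.erase v.1).insert s 1, T ++ [(s, 1)], bledy + 1,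
        hArun, hBrun, by simp, ?_, ?_, ?_⟩
      · simp only [List.map_append, List.map_cons, List.map_nil]
        have hperm := List.perm_append_singleton s (T.map Prod.fst)
        rw [hperm.nodup_iff]
        refine List.nodup_cons.2 ⟨fun hc' => hsS (List.mem_cons_of_mem _ hc'), ?_⟩
        exact (List.nodup_cons.1 (by simpa using hndS)).2
      · intro pr hpr
        rcases List.mem_append.1 hpr with hm | hm
        · exact hbitsS pr (List.mem_cons_of_mem _ hm)
        · rw [List.mem_singleton.1 hm]; exact Or.inr rfl
      · exact evict_dict_corr bity2 v T s (fun p => by rw [hc2 p, hvT]) hndS hsS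

lemma foldl_rel (roz : Int) (hroz : 1 ≤ roz) (l : List Int) :
    ∀ (pamiec : List Int) (bity : PySem.Dict Int Int) (bledy : Int) (mem : List (Int × Int)),
    RelAB pamiec bity mem →
    (l.foldl (lfuStep roz) (pamiec, bity, bledy)).2.2
      = (l.foldl (bStep roz) (mem, bledy)).2 := by
  induction l with
  | nil => intro _ _ _ _ _; rfl
  | cons x t ih =>
    intro pam bity bl mem hrel
    obtain ⟨pam', bity', mem', bl', hA, hB, hrel'⟩ := step_rel roz x pam bity bl mem hroz hrel
    simp only [List.foldl_cons, hA, hB]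
    exact ih pam' bity' bl' mem' hrel'

-- ===== VERDICT (by name: the statement is the Claim_ definition above) =====
theorem lfu_spec : Claim_equal_lfu := by
  intro ciag roz _ hpre
  unfold Spec_lfu
  rcases hpre with hroz | hnil
  · have h0 : RelAB [] PySem.Dict.empty [] := by
      refine ⟨rfl, List.nodup_nil, by simp, fun p => by simp [PySem.Dict.get?_empty, lookB]⟩
    exact foldl_rel roz hroz ciag [] PySem.Dict.empty 0 [] h0
  · subst hnil; rfl
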